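-- pv_equiv track=rewrite | github.com/alexbenari/github-summarizer | app/repo_processor/parser.py | _extract_top_level_sections
-- ===== SOURCE A (Python) =====
-- from typing import Optional
--
-- INPUT_HEADER_TO_FIELD = {
--     "# Repository Metadata": "repository_metadata",
--     "# Language Stats": "language_stats",
--     "# Directory Tree": "directory_tree",
--     "# README": "readme",
--     "# Documentation": "documentation",
--     "# Build and Package Data": "build_and_package_data",
--     "# Tests": "tests",
--     "# Code": "code",
--     "# Extraction Stats": "extraction_stats",
--     "# Warnings": "warnings",
-- }
--
-- def _extract_top_level_sections(markdown_text: str) -> dict[str, Optional[str]]: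
--     results: dict[str, Optional[str]] = {field: None for field in INPUT_HEADER_TO_FIELD.values()}
--     lines = _lines_with_ends(markdown_text)
--     boundaries = _known_section_boundaries(lines)
--     if not boundaries:
--         return results
--
--     for index, (heading, start_line_index, start_offset) in enumerate(boundaries):
--         field = INPUT_HEADER_TO_FIELD[heading]
--         line = lines[start_line_index]
--         start = start_offset + len(line)
--         end = boundaries[index + 1][2] if index + 1 < len(boundaries) else len(markdown_text)
--         body = markdown_text[start:end].strip()
--         results[field] = body if body else None
--     return results
--
-- def _known_section_boundaries(lines: list[str]) -> list[tuple[str, int, int]]: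
--     boundaries: list[tuple[str, int, int]] = []
--     offset = 0
--     in_fence = False
--
--     for index, line in enumerate(lines):
--         stripped = line.strip()
--         if stripped.startswith("```"):
--             in_fence = not in_fence
--         if not in_fence and stripped in INPUT_HEADER_TO_FIELD:
--             boundaries.append((stripped, index, offset))
--         offset += len(line)
--
--     return boundaries
--
-- def _lines_with_ends(text: str) -> list[str]:
--     return text.splitlines(keepends=True)
-- ===== SOURCE B (Python) =====
-- from typing import Optional
--
-- INPUT_HEADER_TO_FIELD = {
--     "# Repository Metadata": "repository_metadata",
--     "# Language Stats": "language_stats",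
--     "# Directory Tree": "directory_tree",
--     "# README": "readme",
--     "# Documentation": "documentation",
--     "# Build and Package Data": "build_and_package_data",
--     "# Tests": "tests",
--     "# Code": "code",
--     "# Extraction Stats": "extraction_stats",
--     "# Warnings": "warnings",
-- }
--
--
-- def _extract_top_level_sections(markdown_text: str) -> dict[str, Optional[str]]:
--     # Single-pass state machine: buffer lines of the current section, flush at each header.
--     results: dict[str, Optional[str]] = {field: None for field in INPUT_HEADER_TO_FIELD.values()}
--     current: Optional[str] = None
--     buffer: list[str] = []
--     in_fence = False
--     for line in markdown_text.splitlines(keepends=True):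
--         stripped = line.strip()
--         if stripped.startswith("```"):
--             in_fence = not in_fence
--         if not in_fence and stripped in INPUT_HEADER_TO_FIELD:
--             if current is not None:
--                 body = "".join(buffer).strip()
--                 results[current] = body or None
--             current = INPUT_HEADER_TO_FIELD[stripped]
--             buffer = []
--         else:
--             buffer.append(line)
--     if current is not None:
--         body = "".join(buffer).strip()
--         results[current] = body or None
--     return results
-- ===== Notes on version B (the rewrite author's own statement) =====
-- stated objective: simpler
-- what changed: Replaces A's two-phase design (collect (heading,index,offset) boundaries, then slice the original string between offsets) with a single-pass state machine that buffers each section's lines and flushes them at the next header and at EOF.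
import Mathlib
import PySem

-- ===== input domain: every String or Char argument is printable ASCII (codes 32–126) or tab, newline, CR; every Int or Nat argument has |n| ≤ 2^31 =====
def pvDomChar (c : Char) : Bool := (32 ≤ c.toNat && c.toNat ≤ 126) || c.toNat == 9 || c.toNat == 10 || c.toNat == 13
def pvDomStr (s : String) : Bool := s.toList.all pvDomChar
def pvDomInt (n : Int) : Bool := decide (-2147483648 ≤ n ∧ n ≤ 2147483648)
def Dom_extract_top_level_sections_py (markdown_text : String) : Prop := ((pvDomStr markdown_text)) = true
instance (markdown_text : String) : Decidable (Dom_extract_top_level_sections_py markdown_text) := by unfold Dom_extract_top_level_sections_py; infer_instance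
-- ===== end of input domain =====

-- B replaces A's two-pass boundary/offset slicing with a single-pass state machine that
-- buffers the current section's lines and flushes at each header (objective: simpler).

-- ===== PORT A =====
-- shared context: the module constant INPUT_HEADER_TO_FIELD (both A and B read it)
def pvHeaderDict : PySem.Dict (List Char) String := PySem.Dict.ofList
  [ ("# Repository Metadata".toList, "repository_metadata")
  , ("# Language Stats".toList, "language_stats")
  , ("# Directory Tree".toList, "directory_tree")
  , ("# README".toList, "readme")
  , ("# Documentation".toList, "documentation")
  , ("# Build and Package Data".toList, "build_and_package_data")
  , ("# Tests".toList, "tests")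
  , ("# Code".toList, "code")
  , ("# Extraction Stats".toList, "extraction_stats")
  , ("# Warnings".toList, "warnings") ]

-- {field: None for field in INPUT_HEADER_TO_FIELD.values()} (identical line in both A and B)
def pvInitResults : PySem.Dict String (Option String) :=
  pvHeaderDict.values.foldl (fun d f => d.insert f none) PySem.Dict.empty

-- _lines_with_ends = text.splitlines(keepends=True); exact on the ASCII domain, where the
-- only line breaks are '\n', '\r', '\r\n' (both A and B call this same builtin)
def pvLinesWithEnds : List Char → List (List Char)
  | [] => []
  | '\r' :: '\n' :: rest => ['\r', '\n'] :: pvLinesWithEnds rest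
  | c :: rest =>
      if c = '\n' ∨ c = '\r' then [c] :: pvLinesWithEnds rest
      else match pvLinesWithEnds rest with
        | [] => [[c]]
        | l :: ls => (c :: l) :: ls

-- _known_section_boundaries
def pvBounds : List (List Char) → Nat → Nat → Bool → List ((List Char) × Nat × Nat)
  | [], _, _, _ => []
  | line :: rest, idx, off, fence =>
    let stripped := PySem.Chars.strip line
    let fence' := if PySem.Chars.startswith stripped "```".toList then !fence else fence
    (if !fence' && pvHeaderDict.contains stripped then [(stripped, idx, off)] else [])
      ++ pvBounds rest (idx + 1) (off + line.length) fence'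

-- the 'for index, (heading, start_line_index, start_offset) in enumerate(boundaries)' loop
def pvPhase2 (t : List Char) (L : List (List Char)) (bs : List ((List Char) × Nat × Nat))
    (idx : Nat) (res : PySem.Dict String (Option String)) : PySem.Dict String (Option String) :=
  if h : idx < bs.length then
    let b := bs[idx]
    let field := (pvHeaderDict.get? b.1).getD ""
    let line := (PySem.List.pyGet? L (b.2.1 : Int)).getD []
    let start := b.2.2 + line.length
    let stop := if h2 : idx + 1 < bs.length then (bs[idx + 1]).2.2 else t.length
    let body := PySem.Chars.strip (PySem.List.slice t (some (start : Int)) (some (stop : Int)))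
    pvPhase2 t L bs (idx + 1) (res.insert field (if body = [] then none else some (String.ofList body)))
  else res
termination_by bs.length - idx

def extract_top_level_sections_py (markdown_text : String) : List (String × Option String) :=
  let results := pvInitResults
  let lines := pvLinesWithEnds markdown_text.toList
  let boundaries := pvBounds lines 0 0 false
  if boundaries = [] then results.items
  else (pvPhase2 markdown_text.toList lines boundaries 0 results).items

-- ===== PORT B =====
-- flush: results[current] = ''.join(buffer).strip() or None  (when current is not None)
def pvFlush (res : PySem.Dict String (Option String)) (cur : Option String)
    (buf : List (List Char)) : PySem.Dict String (Option String) :=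
  match cur with
  | none => res
  | some f =>
      let body := PySem.Chars.strip buf.flatten
      res.insert f (if body = [] then none else some (String.ofList body))

-- the single-pass loop over splitlines(keepends=True), with the final flush
def pvGoB : List (List Char) → PySem.Dict String (Option String) → Option String →
    List (List Char) → Bool → PySem.Dict String (Option String)
  | [], res, cur, buf, _ => pvFlush res cur buf
  | line :: rest, res, cur, buf, fence =>
    let stripped := PySem.Chars.strip line
    let fence' := if PySem.Chars.startswith stripped "```".toList then !fence else fence
    if !fence' && pvHeaderDict.contains stripped then
      pvGoB rest (pvFlush res cur buf) (some ((pvHeaderDict.get? stripped).getD "")) [] fence'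
    else
      pvGoB rest res cur (buf ++ [line]) fence'

def extract_top_level_sections_py_alt (markdown_text : String) : List (String × Option String) :=
  (pvGoB (pvLinesWithEnds markdown_text.toList) pvInitResults none [] false).items

-- ===== PRECONDITION & SPEC =====
def Spec_extract_top_level_sections_py (markdown_text : String) (out : List (String × Option String)) : Prop := out = extract_top_level_sections_py_alt markdown_text
instance (markdown_text : String) (out : List (String × Option String)) : Decidable (Spec_extract_top_level_sections_py markdown_text out) := by unfold Spec_extract_top_level_sections_py; infer_instance

-- ===== CLAIM (what is proved, stated in full; the proofs are below) =====
def Claim_equal_extract_top_level_sections_py : Prop := ∀ (markdown_text : String), Dom_extract_top_level_sections_py markdown_text → Spec_extract_top_level_sections_py markdown_text (extract_top_level_sections_py markdown_text)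

-- ===== LEMMAS AND PROOFS =====

-- the splitlines partition the text
theorem pvLinesWithEnds_flatten (cs : List Char) : (pvLinesWithEnds cs).flatten = cs := by
  fun_induction pvLinesWithEnds cs with
  | case1 => rfl
  | case2 rest ih => simp [ih]
  | case3 c rest h1 h2 ih => simp [ih]
  | case4 c rest h1 h2 heq ih => simp_all
  | case5 c rest h1 h2 l ls heq ih => simp_all

-- proof-side view of B's loop: the preamble lines and the (field, body-lines) sections
def pvSecs : List (List Char) → Bool → (List (List Char)) × List (String × List (List Char))
  | [], _ => ([], [])
  | line :: rest, fence =>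
    let stripped := PySem.Chars.strip line
    let fence' := if PySem.Chars.startswith stripped "```".toList then !fence else fence
    let p := pvSecs rest fence'
    if !fence' && pvHeaderDict.contains stripped then
      ([], (((pvHeaderDict.get? stripped).getD ""), p.1) :: p.2)
    else (line :: p.1, p.2)

def pvIns (res : PySem.Dict String (Option String)) (p : String × List (List Char)) :
    PySem.Dict String (Option String) := pvFlush res (some p.1) p.2

theorem pvGoB_eq_secs (lines : List (List Char)) : ∀ fence res cur buf,
    pvGoB lines res cur buf fence =
      (pvSecs lines fence).2.foldl pvIns (pvFlush res cur (buf ++ (pvSecs lines fence).1)) := by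
  induction lines with
  | nil => intro fence res cur buf; simp [pvGoB, pvSecs]
  | cons line rest ih =>
    intro fence res cur buf
    simp only [pvGoB, pvSecs]
    by_cases h : (!(if PySem.Chars.startswith (PySem.Chars.strip line) "```".toList then !fence else fence)
        && pvHeaderDict.contains (PySem.Chars.strip line)) = true
    · simp only [h, if_true, ih]
      simp [List.foldl_cons, pvIns]
    · simp only [Bool.not_eq_true] at h
      simp only [h, Bool.false_eq_true, if_false, ih]
      simp [List.append_assoc]

-- A-side views of the boundary list
def pvPreOf (L : List (List Char)) (k : Nat) : List ((List Char) × Nat × Nat) → List (List Char)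
  | [] => L.drop k
  | b :: _ => (L.take b.2.1).drop k

def pvToSecs (L : List (List Char)) : List ((List Char) × Nat × Nat) → List (String × List (List Char))
  | [] => []
  | [b] => [((pvHeaderDict.get? b.1).getD "", L.drop (b.2.1 + 1))]
  | b :: b' :: bs =>
      ((pvHeaderDict.get? b.1).getD "", (L.take b'.2.1).drop (b.2.1 + 1)) :: pvToSecs L (b' :: bs)

theorem pvTakeSucc_flatten_length (L : List (List Char)) (k : Nat) (hk : k < L.length) :
    ((L.take (k + 1)).flatten.length) = (L.take k).flatten.length + L[k].length := by
  rw [List.take_add_one]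
  simp [hk]

theorem pvBounds_inv (L : List (List Char)) : ∀ (rest : List (List Char)) (k : Nat) (fence : Bool),
    rest = L.drop k →
    ((∀ x ∈ pvBounds rest k ((L.take k).flatten.length) fence,
        k ≤ x.2.1 ∧ x.2.1 < L.length ∧ x.2.2 = (L.take x.2.1).flatten.length)
     ∧ (pvBounds rest k ((L.take k).flatten.length) fence).Pairwise (fun a b => a.2.1 < b.2.1)) := by
  intro rest
  induction rest with
  | nil => intro k fence h; simp [pvBounds]
  | cons line rest' ih =>
    intro k fence h
    have hk : k < L.length := by
      by_contra hk
      rw [List.drop_eq_nil_of_le (Nat.le_of_not_lt hk)] at h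
      exact List.cons_ne_nil _ _ h
    rw [List.drop_eq_getElem_cons hk] at h
    obtain ⟨hline, hrest⟩ : line = L[k] ∧ rest' = L.drop (k + 1) := by
      injection h with h1 h2; exact ⟨h1, h2⟩
    have hoff : (L.take k).flatten.length + line.length = (L.take (k + 1)).flatten.length := by
      rw [hline, pvTakeSucc_flatten_length L k hk]
    simp only [pvBounds, hoff]
    obtain ⟨ihm, ihp⟩ := ih (k + 1)
      (if PySem.Chars.startswith (PySem.Chars.strip line) "```".toList then !fence else fence) hrest
    by_cases hhit : (!(if PySem.Chars.startswith (PySem.Chars.strip line) "```".toList then !fence else fence)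
        && pvHeaderDict.contains (PySem.Chars.strip line)) = true
    · simp only [hhit, if_true, List.singleton_append]
      refine ⟨?_, ?_⟩
      · intro x hx
        rcases List.mem_cons.mp hx with hx1 | hx1
        · subst hx1; exact ⟨le_refl _, hk, rfl⟩
        · obtain ⟨h1, h2, h3⟩ := ihm x hx1; exact ⟨by omega, h2, h3⟩
      · exact List.Pairwise.cons (fun y hy => by have := (ihm y hy).1; simpa using by omega) ihp
    · simp only [Bool.not_eq_true] at hhit
      simp only [hhit, Bool.false_eq_true, if_false, List.nil_append]
      exact ⟨fun x hx => ⟨by have := (ihm x hx).1; omega, (ihm x hx).2⟩, ihp⟩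

theorem pvSecs_eq_toSecs (L : List (List Char)) : ∀ (rest : List (List Char)) (k : Nat) (fence : Bool),
    rest = L.drop k →
    pvSecs rest fence =
      (pvPreOf L k (pvBounds rest k ((L.take k).flatten.length) fence),
       pvToSecs L (pvBounds rest k ((L.take k).flatten.length) fence)) := by
  intro rest
  induction rest with
  | nil => intro k fence h; simp [pvSecs, pvBounds, pvPreOf, pvToSecs, h]
  | cons line rest' ih =>
    intro k fence h
    have hk : k < L.length := by
      by_contra hk
      rw [List.drop_eq_nil_of_le (Nat.le_of_not_lt hk)] at h
      exact List.cons_ne_nil _ _ h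
    rw [List.drop_eq_getElem_cons hk] at h
    obtain ⟨hline, hrest⟩ : line = L[k] ∧ rest' = L.drop (k + 1) := by
      injection h with h1 h2; exact ⟨h1, h2⟩
    have hoff : (L.take k).flatten.length + line.length = (L.take (k + 1)).flatten.length := by
      rw [hline, pvTakeSucc_flatten_length L k hk]
    have ihm := (pvBounds_inv L rest' (k + 1)
      (if PySem.Chars.startswith (PySem.Chars.strip line) "```".toList then !fence else fence) hrest).1
    simp only [pvSecs, pvBounds, hoff,
      ih (k + 1) (if PySem.Chars.startswith (PySem.Chars.strip line) "```".toList then !fence else fence) hrest]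
    by_cases hhit : (!(if PySem.Chars.startswith (PySem.Chars.strip line) "```".toList then !fence else fence)
        && pvHeaderDict.contains (PySem.Chars.strip line)) = true
    · simp only [hhit, if_true, List.singleton_append]
      have hnil : (L.take k).drop k = [] :=
        List.drop_eq_nil_of_le (by simp)
      cases hbs : pvBounds rest' (k + 1) ((L.take (k + 1)).flatten.length)
          (if PySem.Chars.startswith (PySem.Chars.strip line) "```".toList then !fence else fence) with
      | nil => simp [pvToSecs, pvPreOf, hnil]
      | cons b' bs'' => simp [pvToSecs, pvPreOf, hnil]
    · simp only [Bool.not_eq_true] at hhit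
      simp only [hhit, Bool.false_eq_true, if_false, List.nil_append]
      cases hbs : pvBounds rest' (k + 1) ((L.take (k + 1)).flatten.length)
          (if PySem.Chars.startswith (PySem.Chars.strip line) "```".toList then !fence else fence) with
      | nil =>
        simp only [pvPreOf, hline, Prod.mk.injEq, and_true]
        exact (List.drop_eq_getElem_cons hk).symm
      | cons b' bs'' =>
        simp only [pvPreOf, Prod.mk.injEq, and_true]
        have hb' : k + 1 ≤ b'.2.1 := (ihm b' (by rw [hbs]; exact List.mem_cons_self ..)).1
        have hb'len : b'.2.1 < L.length := (ihm b' (by rw [hbs]; exact List.mem_cons_self ..)).2.1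
        have hklen : k < (L.take b'.2.1).length := by
          rw [List.length_take]; omega
        rw [List.drop_eq_getElem_cons hklen]
        rw [List.getElem_take, hline]

theorem pvSlice_flatten (L : List (List Char)) (i j : Nat) (hij : i ≤ j) :
    PySem.List.slice L.flatten (some ((L.take i).flatten.length : Int))
      (some ((L.take j).flatten.length : Int)) = ((L.take j).drop i).flatten := by
  rw [PySem.List.slice_natCast]
  have h2 : (L.take j).flatten = (L.take i).flatten ++ ((L.take j).drop i).flatten := by
    rw [← List.flatten_append]
    congr 1
    conv_lhs => rw [← List.take_append_drop i (L.take j)]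
    rw [List.take_take, Nat.min_eq_left hij]
  have h1 : L.flatten
      = (L.take i).flatten ++ (((L.take j).drop i).flatten ++ (L.drop j).flatten) := by
    conv_lhs => rw [← List.take_append_drop j L]
    rw [List.flatten_append, h2, List.append_assoc]
  rw [h1, List.drop_left]
  have h3 : (L.take j).flatten.length - (L.take i).flatten.length
      = ((L.take j).drop i).flatten.length := by
    rw [h2]; simp
  rw [h3, List.take_left]

theorem pvPhase2_eq (L : List (List Char)) (bs : List ((List Char) × Nat × Nat))
    (hm : ∀ x ∈ bs, x.2.1 < L.length ∧ x.2.2 = (L.take x.2.1).flatten.length)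
    (hp : bs.Pairwise (fun a b => a.2.1 < b.2.1)) :
    ∀ (n idx : Nat) (res : PySem.Dict String (Option String)), bs.length - idx = n →
      pvPhase2 L.flatten L bs idx res = (pvToSecs L (bs.drop idx)).foldl pvIns res := by
  intro n
  induction n with
  | zero =>
    intro idx res hn
    rw [pvPhase2, dif_neg (by omega : ¬ idx < bs.length),
      List.drop_eq_nil_of_le (by omega : bs.length ≤ idx)]
    rfl
  | succ n ihn =>
    intro idx res hn
    have hlt : idx < bs.length := by omega
    obtain ⟨hi, ho⟩ := hm bs[idx] (List.getElem_mem hlt)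
    rw [pvPhase2, dif_pos hlt]
    simp only [PySem.List.pyGet?_natCast, List.getElem?_eq_getElem hi, Option.getD_some, ho,
      ← pvTakeSucc_flatten_length L bs[idx].2.1 hi]
    by_cases hlt2 : idx + 1 < bs.length
    · obtain ⟨hi', ho'⟩ := hm bs[idx + 1] (List.getElem_mem hlt2)
      have hij : bs[idx].2.1 < bs[idx + 1].2.1 :=
        List.pairwise_iff_getElem.mp hp idx (idx + 1) hlt hlt2 (by omega)
      rw [dif_pos hlt2, ho',
        pvSlice_flatten L (bs[idx].2.1 + 1) (bs[idx + 1].2.1) (by omega),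
        List.drop_eq_getElem_cons hlt, List.drop_eq_getElem_cons hlt2,
        ihn (idx + 1) _ (by omega), List.drop_eq_getElem_cons hlt2]
      simp [pvToSecs, pvIns, pvFlush]
    · have hlen : bs.length = idx + 1 := by omega
      have hflat : (L.flatten.length : Int) = ((L.take L.length).flatten.length : Int) := by
        rw [List.take_length]
      rw [dif_neg hlt2, hflat,
        pvSlice_flatten L (bs[idx].2.1 + 1) L.length (by omega),
        List.take_length, List.drop_eq_getElem_cons hlt,
        List.drop_eq_nil_of_le (by omega : bs.length ≤ idx + 1),
        ihn (idx + 1) _ (by omega),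
        List.drop_eq_nil_of_le (by omega : bs.length ≤ idx + 1)]
      simp [pvToSecs, pvIns, pvFlush]

-- ===== VERDICT (by name: the statement is the Claim_ definition above) =====
theorem extract_top_level_sections_py_spec : Claim_equal_extract_top_level_sections_py := by
  intro t _
  unfold Spec_extract_top_level_sections_py extract_top_level_sections_py extract_top_level_sections_py_alt
  have hL : (pvLinesWithEnds t.toList).flatten = t.toList := pvLinesWithEnds_flatten t.toList
  set L := pvLinesWithEnds t.toList with hLdef
  have h0 : ((L.take 0).flatten.length) = 0 := rfl
  have hsecs := pvSecs_eq_toSecs L L 0 false (by simp)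
  rw [h0] at hsecs
  obtain ⟨hm, hp⟩ := pvBounds_inv L L 0 false (by simp)
  rw [h0] at hm hp
  rw [pvGoB_eq_secs, hsecs]
  cases hbs : pvBounds L 0 0 false with
  | nil =>
    rw [if_pos hbs]
    simp [pvToSecs, pvFlush]
  | cons b bs' =>
    rw [if_neg (by simp [hbs])]
    rw [hbs] at hm hp
    have h2 := pvPhase2_eq L (b :: bs') (fun x hx => (hm x hx).2) hp ((b :: bs').length - 0) 0
      pvInitResults rfl
    rw [hL] at h2
    rw [hbs, h2]
    simp [pvFlush]
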